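-- pv_equiv track=rewrite | github.com/LeonardoFGaldino/Axxen-Scripts | script retificação mais utilizados com retificador final/RETIFICADOR_FINAL.py | totalizador_0990_9999
-- ===== SOURCE A (Python) =====
-- def totalizador_0990_9999(linhas):
--     count_reg_0 = sum(1 for linha in linhas if linha.startswith('|0'))
--
--     for i, linha in enumerate(linhas):
--         if linha.startswith('|0990|'):
--             campos = linha.split('|')
--             campos[2] = str(count_reg_0)
--             linhas[i] = '|'.join(campos)
--             break
--
--     total_linhas = len(linhas)
--     for i, linha in enumerate(linhas):
--         if linha.startswith('|9999|'):
--             campos = linha.split('|')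
--             campos[2] = str(total_linhas)
--             linhas[i] = '|'.join(campos)
--             break
--
--     return linhas
-- ===== SOURCE B (Python) =====
-- def totalizador_0990_9999(linhas):
--     # One reverse sweep: count '|0' lines and keep the smallest index of each
--     # target record by overwriting; then patch the matched lines by raw index
--     # surgery (slice + find) instead of split/assign/join.
--     conta = 0
--     i0990 = -1
--     i9999 = -1
--     for i in range(len(linhas) - 1, -1, -1):
--         l = linhas[i]
--         if l[:2] == '|0':
--             conta += 1
--         if l[:6] == '|0990|':
--             i0990 = i
--         elif l[:6] == '|9999|':
--             i9999 = i
--     if i0990 >= 0: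
--         linhas[i0990] = _cirurgia(linhas[i0990], str(conta))
--     if i9999 >= 0:
--         linhas[i9999] = _cirurgia(linhas[i9999], str(len(linhas)))
--     return linhas
--
--
-- def _cirurgia(l, valor):
--     # l starts with '|xxxx|'; replace the text between the 2nd and 3rd '|'
--     # (or up to the end) without splitting the line.
--     corte = l.find('|', 6)
--     return l[:6] + valor + (l[corte:] if corte >= 0 else '')
-- ===== Notes on version B (the rewrite author's own statement) =====
-- stated objective: alternative
-- what changed: B never splits a line: it does one reverse sweep that counts '|0' lines and keeps the smallest matching index by overwrite, then rewrites field 2 of the matched lines by raw index surgery (l[:6] + value + tail located with find) instead of A's forward scans with split/assign/join.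
import Mathlib
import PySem

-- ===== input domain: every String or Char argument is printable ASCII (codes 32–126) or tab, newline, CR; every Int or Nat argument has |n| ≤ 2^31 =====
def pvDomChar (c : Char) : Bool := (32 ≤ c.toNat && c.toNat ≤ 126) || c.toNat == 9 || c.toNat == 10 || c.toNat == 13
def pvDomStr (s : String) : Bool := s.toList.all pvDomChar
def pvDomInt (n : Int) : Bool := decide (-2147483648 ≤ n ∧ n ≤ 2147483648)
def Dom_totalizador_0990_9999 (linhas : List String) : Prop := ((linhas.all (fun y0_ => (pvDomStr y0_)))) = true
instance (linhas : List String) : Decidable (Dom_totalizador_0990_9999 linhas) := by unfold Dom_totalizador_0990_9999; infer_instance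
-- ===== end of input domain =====

-- B never splits a line: one reverse sweep counts '|0' lines and keeps the smallest matching
-- index by overwrite, then field 2 of each matched line is rewritten by raw index surgery
-- (slice + find) instead of A's forward scans with split/assign/join.
-- A mutates `linhas` in place in Python (B performs the same mutation); the equivalence proved
-- here is about the returned list of lines.

-- ===== PORT A =====
-- A's two 'for … if startswith: edit; break' loops, transcribed as one parametric structural
-- recursion used twice. campos[2] = v is ported with pySetD: a line starting with '|<pref>|'
-- splits on '|' into at least three fields, so index 2 is always in range (no IndexError in A).
-- linha.split('|') is ported with split?; the separator is the non-empty literal '|', so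
-- split? is always `some` and the `.getD []` default is never used.
def pvEditFirstA (pref v : String) : List String → List String
  | [] => []
  | linha :: rest =>
    if PySem.Str.startswith linha pref then
      (PySem.Str.join "|" (PySem.List.pySetD ((PySem.Str.split? linha "|").getD []) 2 v)) :: rest
    else linha :: pvEditFirstA pref v rest

def totalizador_0990_9999 (linhas : List String) : List String :=
  let count_reg_0 : Int :=
    linhas.foldl (fun acc linha => if PySem.Str.startswith linha "|0" then acc + 1 else acc) 0
  let linhas1 := pvEditFirstA "|0990|" (PySem.Int.toStr count_reg_0) linhas
  let total_linhas : Int := (linhas1.length : Int)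
  pvEditFirstA "|9999|" (PySem.Int.toStr total_linhas) linhas1

-- ===== PORT B =====
-- helper _cirurgia of Source B: replace the text between the 2nd and 3rd '|' (or up to the end)
-- by slice + find index surgery, without splitting the line
def pvCirurgia (l valor : String) : String :=
  let corte := PySem.Str.findFrom l "|" 6
  PySem.Str.slice l none (some 6) ++ valor ++
    (if 0 ≤ corte then PySem.Str.slice l (some corte) none else "")

-- the body of Source B's reverse 'for i in range(len(linhas)-1, -1, -1)' loop
def pvVarredura (linhas : List String) (s : Int × Int × Int) (i : Int) : Int × Int × Int :=
  let l := PySem.List.pyGetD linhas i ""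
  let conta := if PySem.Str.slice l none (some 2) = "|0" then s.1 + 1 else s.1
  if PySem.Str.slice l none (some 6) = "|0990|" then (conta, i, s.2.2)
  else if PySem.Str.slice l none (some 6) = "|9999|" then (conta, s.2.1, i)
  else (conta, s.2)

def totalizador_0990_9999_alt (linhas : List String) : List String :=
  let n : Int := (linhas.length : Int)
  let s := (PySem.List.pyRange (n - 1) (-1) (-1)).foldl (pvVarredura linhas) (0, -1, -1)
  let linhas1 :=
    if 0 ≤ s.2.1 then
      PySem.List.pySetD linhas s.2.1
        (pvCirurgia (PySem.List.pyGetD linhas s.2.1 "") (PySem.Int.toStr s.1))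
    else linhas
  if 0 ≤ s.2.2 then
    PySem.List.pySetD linhas1 s.2.2
      (pvCirurgia (PySem.List.pyGetD linhas1 s.2.2 "") (PySem.Int.toStr n))
  else linhas1

-- ===== PRECONDITION & SPEC =====
def Spec_totalizador_0990_9999 (linhas : List String) (out : List String) : Prop := out = totalizador_0990_9999_alt linhas
instance (linhas : List String) (out : List String) : Decidable (Spec_totalizador_0990_9999 linhas out) := by unfold Spec_totalizador_0990_9999; infer_instance

-- ===== CLAIM (what is proved, stated in full; the proofs are below) =====
def Claim_equal_totalizador_0990_9999 : Prop := ∀ (linhas : List String), Dom_totalizador_0990_9999 linhas → Spec_totalizador_0990_9999 linhas (totalizador_0990_9999 linhas)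

-- ===== LEMMAS AND PROOFS =====

-- A's per-line edit, named for the proofs (pvEditFirstA inlines this expression)
def pvRewriteA (linha v : String) : String :=
  PySem.Str.join "|" (PySem.List.pySetD ((PySem.Str.split? linha "|").getD []) 2 v)

-- ---- splitOn machinery (recurrences for the fueled PySem.Chars.splitOn.go) ----
theorem pvGo_zero (l cur : List Char) (acc : List (List Char)) :
    PySem.Chars.splitOn.go ['|'] 0 l cur acc = ((cur.reverse ++ l) :: acc).reverse := by
  simp [PySem.Chars.splitOn.go]
theorem pvGo_nil (fuel : Nat) (cur : List Char) (acc : List (List Char)) :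
    PySem.Chars.splitOn.go ['|'] (fuel + 1) [] cur acc = (cur.reverse :: acc).reverse := by
  rw [PySem.Chars.splitOn.go]; omega
theorem pvGo_sep (fuel : Nat) (rest cur : List Char) (acc : List (List Char)) :
    PySem.Chars.splitOn.go ['|'] (fuel + 1) ('|' :: rest) cur acc =
      PySem.Chars.splitOn.go ['|'] fuel rest [] (cur.reverse :: acc) := by
  rw [PySem.Chars.splitOn.go]
  simp [List.isPrefixOf]
theorem pvGo_char (fuel : Nat) (c : Char) (rest cur : List Char) (acc : List (List Char))
    (h : c ≠ '|') :
    PySem.Chars.splitOn.go ['|'] (fuel + 1) (c :: rest) cur acc =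
      PySem.Chars.splitOn.go ['|'] fuel rest (c :: cur) acc := by
  rw [PySem.Chars.splitOn.go]
  simp [List.isPrefixOf, Ne.symm h]
theorem pvGo_acc (fuel : Nat) : ∀ (l cur : List Char) (acc : List (List Char)),
    PySem.Chars.splitOn.go ['|'] fuel l cur acc =
      acc.reverse ++ PySem.Chars.splitOn.go ['|'] fuel l cur [] := by
  induction fuel with
  | zero => intro l cur acc; simp [pvGo_zero]
  | succ n ih =>
    intro l cur acc
    cases l with
    | nil => simp [pvGo_nil]
    | cons c rest =>
      by_cases hc : c = '|'
      · subst hc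
        rw [pvGo_sep, pvGo_sep, ih rest [] (cur.reverse :: acc), ih rest [] [cur.reverse]]
        simp
      · rw [pvGo_char _ _ _ _ _ hc, pvGo_char _ _ _ _ _ hc]
        exact ih rest (c :: cur) acc
theorem pvGo_ne_nil (fuel : Nat) : ∀ (l cur : List Char),
    PySem.Chars.splitOn.go ['|'] fuel l cur [] ≠ [] := by
  induction fuel with
  | zero => intro l cur; simp [pvGo_zero]
  | succ n ih =>
    intro l cur
    cases l with
    | nil => rw [pvGo_nil]; simp
    | cons c rest =>
      by_cases hc : c = '|'
      · subst hc
        rw [pvGo_sep, pvGo_acc]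
        simp
      · rw [pvGo_char _ _ _ _ _ hc]; exact ih rest (c :: cur)
theorem pvGo_cur (fuel : Nat) : ∀ (l cur : List Char),
    PySem.Chars.splitOn.go ['|'] fuel l cur [] =
      (PySem.Chars.splitOn.go ['|'] fuel l [] []).modifyHead (cur.reverse ++ ·) := by
  induction fuel with
  | zero => intro l cur; simp [pvGo_zero]
  | succ n ih =>
    intro l cur
    cases l with
    | nil => simp [pvGo_nil]
    | cons c rest =>
      by_cases hc : c = '|'
      · subst hc
        rw [pvGo_sep, pvGo_sep, pvGo_acc _ _ _ [List.reverse cur], pvGo_acc _ _ _ [List.reverse []]]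
        simp
      · rw [pvGo_char _ _ _ _ _ hc, pvGo_char _ _ _ _ _ hc, ih rest (c :: cur), ih rest [c]]
        obtain ⟨h, t, hz⟩ := List.exists_cons_of_ne_nil (pvGo_ne_nil n rest [])
        rw [hz]
        simp
theorem pvSplitOn_ne_nil (r : List Char) : PySem.Chars.splitOn r ['|'] ≠ [] :=
  pvGo_ne_nil _ r []
theorem pvSplitOn_nil : PySem.Chars.splitOn [] ['|'] = [[]] := by
  show PySem.Chars.splitOn.go ['|'] 0 [] [] [] = [[]]
  simp [pvGo_zero]
theorem pvSplitOn_cons_sep (r : List Char) :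
    PySem.Chars.splitOn ('|' :: r) ['|'] = [] :: PySem.Chars.splitOn r ['|'] := by
  show PySem.Chars.splitOn.go ['|'] _ _ [] [] = _
  simp only [List.length_cons]
  rw [pvGo_sep, pvGo_acc]
  rfl
theorem pvSplitOn_cons_char (c : Char) (r : List Char) (h : c ≠ '|') :
    PySem.Chars.splitOn (c :: r) ['|'] =
      (PySem.Chars.splitOn r ['|']).modifyHead (fun p => c :: p) := by
  show PySem.Chars.splitOn.go ['|'] _ _ [] [] = _
  simp only [List.length_cons]
  rw [pvGo_char _ _ _ _ _ h, pvGo_cur]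
  obtain ⟨h0, t0, hz⟩ := List.exists_cons_of_ne_nil (pvSplitOn_ne_nil r)
  show (PySem.Chars.splitOn r ['|']).modifyHead _ = _
  rw [hz]
  simp
theorem pvSplitOn_pref (a b c d : Char) (r : List Char)
    (ha : a ≠ '|') (hb : b ≠ '|') (hc : c ≠ '|') (hd : d ≠ '|') :
    PySem.Chars.splitOn ('|' :: a :: b :: c :: d :: '|' :: r) ['|'] =
      [] :: [a, b, c, d] :: PySem.Chars.splitOn r ['|'] := by
  rw [pvSplitOn_cons_sep, pvSplitOn_cons_char a _ ha, pvSplitOn_cons_char b _ hb,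
      pvSplitOn_cons_char c _ hc, pvSplitOn_cons_char d _ hd, pvSplitOn_cons_sep]
  simp [List.modifyHead]

theorem pvJoin_cons_head (sep : List Char) (c : Char) (h : List Char) (t : List (List Char)) :
    PySem.Chars.join sep ((c :: h) :: t) = c :: PySem.Chars.join sep (h :: t) := by
  cases t with
  | nil => simp [PySem.Chars.join_singleton]
  | cons t0 ts => rw [PySem.Chars.join_cons_cons, PySem.Chars.join_cons_cons]; simp

-- '|'.join(splitOn r) = r: the split/join round trip
theorem pvJoinSplit : ∀ r : List Char, PySem.Chars.join ['|'] (PySem.Chars.splitOn r ['|']) = r := by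
  intro r
  induction r with
  | nil => rw [pvSplitOn_nil, PySem.Chars.join_singleton]
  | cons c r ih =>
    by_cases hc : c = '|'
    · subst hc
      rw [pvSplitOn_cons_sep]
      obtain ⟨h0, t0, hz⟩ := List.exists_cons_of_ne_nil (pvSplitOn_ne_nil r)
      rw [hz] at ih ⊢
      rw [PySem.Chars.join_cons_cons, ih]
      simp
    · rw [pvSplitOn_cons_char c _ hc]
      obtain ⟨h0, t0, hz⟩ := List.exists_cons_of_ne_nil (pvSplitOn_ne_nil r)
      rw [hz] at ih ⊢
      simp only [List.modifyHead]
      rw [pvJoin_cons_head, ih]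

-- joining v with the tail of splitOn r reconstructs r from its first '|' onward
theorem pvTailJoin (v : List Char) : ∀ r : List Char,
    PySem.Chars.join ['|'] (v :: (PySem.Chars.splitOn r ['|']).tail) =
      v ++ r.dropWhile (· ≠ '|') := by
  intro r
  induction r with
  | nil => rw [pvSplitOn_nil]; simp [PySem.Chars.join_singleton]
  | cons c r ih =>
    by_cases hc : c = '|'
    · subst hc
      rw [pvSplitOn_cons_sep]
      obtain ⟨h0, t0, hz⟩ := List.exists_cons_of_ne_nil (pvSplitOn_ne_nil r)
      have hr := pvJoinSplit r
      rw [hz] at hr ⊢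
      simp only [List.tail_cons]
      rw [PySem.Chars.join_cons_cons, hr]
      simp [List.dropWhile]
    · rw [pvSplitOn_cons_char c _ hc]
      obtain ⟨h0, t0, hz⟩ := List.exists_cons_of_ne_nil (pvSplitOn_ne_nil r)
      rw [hz] at ih ⊢
      simp only [List.modifyHead, List.tail_cons] at ih ⊢
      rw [ih]
      simp [List.dropWhile, hc]

-- dropWhile (≠ '|') = drop to the first '|'
theorem pvDropWhile_eq_drop : ∀ (r : List Char) (k : Nat) (hk : k < r.length),
    r[k] = '|' → (∀ i (_ : i < k) (hi : i < r.length), r[i] ≠ '|') →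
    r.dropWhile (· ≠ '|') = r.drop k := by
  intro r
  induction r with
  | nil => intro k hk; simp at hk
  | cons x t ih =>
    intro k hk hx hlt
    cases k with
    | zero =>
      simp at hx
      simp [List.dropWhile, hx]
    | succ k =>
      have hx0 : x ≠ '|' := by
        have := hlt 0 (Nat.succ_pos k) (by simp)
        simpa using this
      rw [List.dropWhile_cons, if_pos (by simpa using hx0), List.drop_succ_cons]
      exact ih k (by simpa using hk) (by simpa using hx)
        (fun i hik hi => by
          have := hlt (i + 1) (by omega) (by simpa using Nat.succ_lt_succ hi)
          simpa using this)

-- l[:k] == pref is startswith(l, pref) when len(pref) = k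
theorem pvSliceStarts (l pref : String) (k : Int) (h0 : 0 ≤ k)
    (hk : pref.toList.length = k.toNat) :
    (PySem.Str.slice l none (some k) = pref) ↔ PySem.Str.startswith l pref = true := by
  have h1 : PySem.Str.startswith l pref = PySem.Chars.startswith l.toList pref.toList := by
    simp [PySem.Str.startswith]
  rw [← String.toList_inj, PySem.Str.toList_slice, PySem.Chars.slice_eq_listSlice,
      PySem.List.slice_to _ h0, h1, PySem.Chars.startswith,
      List.isPrefixOf_iff_prefix, List.prefix_iff_eq_take, hk]
  exact eq_comm

-- the character-level value of B's surgery on a line '|abcd|...'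
theorem pvCirurgia_toList (l v : String) (a b c d : Char) (r : List Char)
    (hl : l.toList = '|' :: a :: b :: c :: d :: '|' :: r) :
    (pvCirurgia l v).toList =
      '|' :: a :: b :: c :: d :: '|' :: (v.toList ++ r.dropWhile (· ≠ '|')) := by
  have hlen : 6 ≤ l.toList.length := by rw [hl]; simp
  have hdrop : l.toList.drop 6 = r := by rw [hl]; rfl
  have hfind : PySem.Str.findFrom l "|" 6 =
      if PySem.Chars.find r ['|'] = -1 then -1 else 6 + PySem.Chars.find r ['|'] := by
    rw [PySem.Str.findFrom_eq]
    have h6 : (6 : Int) = ((6 : Nat) : Int) := rfl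
    rw [h6, PySem.Chars.findFrom_natCast l.toList _ 6 hlen, hdrop]
    rfl
  unfold pvCirurgia
  rw [String.toList_append, String.toList_append, PySem.Str.toList_slice,
      PySem.Chars.slice_eq_listSlice, PySem.List.slice_to _ (by norm_num), hl]
  by_cases hf : PySem.Chars.find r ['|'] = -1
  · rw [hfind, if_pos hf, if_neg (by norm_num)]
    have hnot : '|' ∉ r := by
      have := (PySem.Chars.find_eq_neg_one_iff r ['|']).mp hf
      intro hmem
      exact this ((List.singleton_infix_iff _ _).mpr hmem)
    have : r.dropWhile (· ≠ '|') = [] := by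
      rw [List.dropWhile_eq_nil_iff]
      intro x hx
      simp only [ne_eq, decide_eq_true_eq]
      intro hxe; exact hnot (hxe ▸ hx)
    rw [this]
    simp
  · have hpos : 0 ≤ PySem.Chars.find r ['|'] := by
      have := PySem.Chars.neg_one_le_find r ['|']
      omega
    rw [hfind, if_neg hf, if_pos (by omega)]
    rw [PySem.Str.toList_slice, PySem.Chars.slice_eq_listSlice,
        PySem.List.slice_from _ (by omega : (0:Int) ≤ 6 + PySem.Chars.find r ['|'])]
    set j : Nat := (PySem.Chars.find r ['|']).toNat with hj
    have hjt : (6 + PySem.Chars.find r ['|']).toNat = 6 + j := by omega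
    rw [hjt]
    have hdrop2 : l.toList.drop (6 + j) = r.drop j := by
      rw [← hdrop, List.drop_drop]
    rw [hdrop2]
    obtain ⟨hpre, hmin⟩ := PySem.Chars.find_spec (s := r) (sub := ['|']) hpos
    rw [← hj] at hpre hmin
    have hjlt : j < r.length := by
      by_contra hge
      rw [List.drop_eq_nil_of_le (by omega)] at hpre
      simp [List.prefix_nil] at hpre
    have hrj : r[j] = '|' := by
      have hcons := List.drop_eq_getElem_cons hjlt
      rw [hcons] at hpre
      obtain ⟨heq, -⟩ := (List.cons_prefix_cons).mp hpre
      exact heq.symm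
    have hdw : r.dropWhile (· ≠ '|') = r.drop j := by
      apply pvDropWhile_eq_drop r j hjlt hrj
      intro i hik hi hbad
      apply hmin i hik
      rw [List.drop_eq_getElem_cons hi, hbad]
      exact List.cons_prefix_cons.mpr ⟨rfl, List.nil_prefix⟩
    rw [hdw]
    simp

-- A's split/assign/join edit equals B's surgery on a '|abcd|…' line
theorem pvEdit_eq (l v : String) (a b c d : Char) (r : List Char)
    (ha : a ≠ '|') (hb : b ≠ '|') (hc : c ≠ '|') (hd : d ≠ '|')
    (hl : l.toList = '|' :: a :: b :: c :: d :: '|' :: r) :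
    pvRewriteA l v = pvCirurgia l v := by
  rw [← String.toList_inj, pvCirurgia_toList l v a b c d r hl]
  unfold pvRewriteA
  rw [PySem.Str.split?, PySem.Chars.split?]
  have hsep : (("|" : String).toList.isEmpty) = false := by decide
  rw [hsep]
  simp only [Bool.false_eq_true, if_false, Option.map_some, Option.getD_some]
  have hsl : ("|" : String).toList = ['|'] := rfl
  rw [hl, hsl, pvSplitOn_pref a b c d r ha hb hc hd]
  obtain ⟨h0, t0, hz⟩ := List.exists_cons_of_ne_nil (pvSplitOn_ne_nil r)
  rw [hz]
  have h2 : ((2 : Int)) = ((2 : Nat) : Int) := rfl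
  rw [List.map_cons, List.map_cons, List.map_cons, h2, PySem.List.pySetD_natCast]
  simp only [List.set]
  rw [PySem.Str.toList_join]
  simp only [List.map_cons, String.toList_ofList, List.map_map]
  have hmap : List.map (String.toList ∘ String.ofList) t0 = t0 := by
    simp [Function.comp_def]
  rw [hmap, hsl]
  rw [PySem.Chars.join_cons_cons, PySem.Chars.join_cons_cons]
  have htail : t0 = (PySem.Chars.splitOn r ['|']).tail := by rw [hz]; rfl
  rw [htail, pvTailJoin]
  simp

-- a line starting with "|0990|" does not start with "|9999|"
theorem pvPrefix_excl (l : String) (h : PySem.Str.startswith l "|0990|" = true) :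
    PySem.Str.startswith l "|9999|" = false := by
  have hpre : PySem.Chars.startswith l.toList ("|0990|".toList) = true := h
  rw [PySem.Chars.startswith] at hpre
  obtain ⟨r, hr⟩ := List.isPrefixOf_iff_prefix.mp hpre
  show PySem.Chars.startswith l.toList ("|9999|".toList) = false
  rw [← hr]
  simp [PySem.Chars.startswith, List.isPrefixOf]

-- B's surgery on a "|0990|" line still does not produce a "|9999|" line
theorem pvCirurgia_not99 (l v : String) (r : List Char)
    (hl : l.toList = '|' :: '0' :: '9' :: '9' :: '0' :: '|' :: r) :
    PySem.Str.startswith (pvCirurgia l v) "|9999|" = false := by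
  show PySem.Chars.startswith (pvCirurgia l v).toList ("|9999|".toList) = false
  rw [pvCirurgia_toList l v '0' '9' '9' '0' r hl]
  simp [PySem.Chars.startswith, List.isPrefixOf]

-- A's edit-first-match loop, characterised by findIdx?
theorem pvEditFirstA_eq (pref v : String) : ∀ (ls : List String),
    pvEditFirstA pref v ls =
      (match List.findIdx? (fun l => PySem.Str.startswith l pref) ls with
       | none => ls
       | some i => ls.set i (pvRewriteA (ls.getD i "") v)) := by
  intro ls
  induction ls with
  | nil => rfl
  | cons linha rest ih =>
    rw [List.findIdx?_cons]
    by_cases h : PySem.Str.startswith linha pref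
    · rw [if_pos (by simpa using h)]
      simp only [pvEditFirstA, if_pos h]
      simp [pvRewriteA]
    · rw [if_neg (by simpa using h)]
      simp only [pvEditFirstA, if_neg h]
      rw [ih]
      cases hf : List.findIdx? (fun l => PySem.Str.startswith l pref) rest with
      | none => simp
      | some i => simp [List.getD]

-- B's reverse sweep (as a foldr over the ascending range), characterised by
-- countP and the first matching indices
theorem pvScanRev (linhas : List String) : ∀ (L : List String) (k : Int), 0 ≤ k →
    (∀ (j : Nat) (hj : j < L.length), PySem.List.pyGetD linhas (k + j) "" = L[j]) →
    (PySem.List.pyRange k (k + L.length) 1).foldr (fun i s => pvVarredura linhas s i) (0, -1, -1) =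
      ((L.countP (fun l => PySem.Str.startswith l "|0") : Int),
       (match L.findIdx? (fun l => PySem.Str.startswith l "|0990|") with
        | none => -1 | some j => k + j),
       (match L.findIdx? (fun l => PySem.Str.startswith l "|9999|") with
        | none => -1 | some j => k + j)) := by
  intro L
  induction L with
  | nil =>
    intro k hk _
    rw [show (k + ((List.length ([] : List String)) : Int)) = k by simp,
        PySem.List.pyRange_one_eq_nil (le_refl k)]
    rfl
  | cons hd t ih =>
    intro k hk hL
    have hlt : k < k + ((hd :: t).length : Int) := by simp; try omega
    rw [PySem.List.pyRange_one_cons hlt, List.foldr_cons,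
        show (k + (((hd :: t).length) : Int)) = (k + 1) + (t.length : Int) by simp only [List.length_cons]; try omega,
        ih (k + 1) (by omega) (fun j hj => by
          have := hL (j + 1) (by simpa using Nat.succ_lt_succ hj)
          rw [show (k + ((j + 1 : Nat) : Int)) = (k + 1) + (j : Int) by omega] at this
          simpa using this)]
    have hhd : PySem.List.pyGetD linhas k "" = hd := by
      have := hL 0 (by simp)
      simpa using this
    have hs0 := pvSliceStarts hd "|0" 2 (by norm_num) (by decide)
    have hs09 := pvSliceStarts hd "|0990|" 6 (by norm_num) (by decide)
    have hs99 := pvSliceStarts hd "|9999|" 6 (by norm_num) (by decide)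
    by_cases h09 : PySem.Str.startswith hd "|0990|" = true
    · have h99 : PySem.Str.startswith hd "|9999|" = false := pvPrefix_excl hd h09
      simp only [PySem.Str.startswith_eq, String.reduceToList] at h09 h99
      cases hf99 : t.findIdx? (fun l => PySem.Str.startswith l "|9999|") with
      | none =>
        simp only [PySem.Str.startswith_eq, String.reduceToList] at hf99
        simp [pvVarredura, hhd, hs0, hs09, hs99, h09, h99,
              List.findIdx?_cons, List.countP_cons, hf99]
        try omega
        try (constructor <;> (try split_ifs) <;> push_cast <;> ring)
        try (split_ifs <;> push_cast <;> ring)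
        try (constructor <;> trivial)
      | some j =>
        simp only [PySem.Str.startswith_eq, String.reduceToList] at hf99
        simp [pvVarredura, hhd, hs0, hs09, hs99, h09, h99,
              List.findIdx?_cons, List.countP_cons, hf99]
        try omega
        try (constructor <;> (try split_ifs) <;> push_cast <;> ring)
        try (split_ifs <;> push_cast <;> ring)
        try (constructor <;> trivial)
    · by_cases h99 : PySem.Str.startswith hd "|9999|" = true
      · simp only [PySem.Str.startswith_eq, String.reduceToList] at h09 h99
        cases hf09 : t.findIdx? (fun l => PySem.Str.startswith l "|0990|") with
        | none =>
          simp only [PySem.Str.startswith_eq, String.reduceToList] at hf09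
          simp [pvVarredura, hhd, hs0, hs09, hs99, h09, h99,
                List.findIdx?_cons, List.countP_cons, hf09]
          try omega
          try (constructor <;> (try split_ifs) <;> push_cast <;> ring)
          try (split_ifs <;> push_cast <;> ring)
          try (constructor <;> trivial)
        | some j =>
          simp only [PySem.Str.startswith_eq, String.reduceToList] at hf09
          simp [pvVarredura, hhd, hs0, hs09, hs99, h09, h99,
                List.findIdx?_cons, List.countP_cons, hf09]
          try omega
          try (constructor <;> (try split_ifs) <;> push_cast <;> ring)
          try (split_ifs <;> push_cast <;> ring)
          try (constructor <;> trivial)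
      · simp only [PySem.Str.startswith_eq, String.reduceToList] at h09 h99
        cases hf09 : t.findIdx? (fun l => PySem.Str.startswith l "|0990|") with
        | none =>
          simp only [PySem.Str.startswith_eq, String.reduceToList] at hf09
          cases hf99 : t.findIdx? (fun l => PySem.Str.startswith l "|9999|") with
          | none =>
            simp only [PySem.Str.startswith_eq, String.reduceToList] at hf99
            simp [pvVarredura, hhd, hs0, hs09, hs99, h09, h99,
                  List.findIdx?_cons, List.countP_cons, hf09, hf99]
            try omega
            try (constructor <;> (try split_ifs) <;> push_cast <;> ring)
            try (split_ifs <;> push_cast <;> ring)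
            try (constructor <;> trivial)
          | some j =>
            simp only [PySem.Str.startswith_eq, String.reduceToList] at hf99
            simp [pvVarredura, hhd, hs0, hs09, hs99, h09, h99,
                  List.findIdx?_cons, List.countP_cons, hf09, hf99]
            try omega
            try (constructor <;> (try split_ifs) <;> push_cast <;> ring)
            try (split_ifs <;> push_cast <;> ring)
            try (constructor <;> trivial)
        | some j =>
          simp only [PySem.Str.startswith_eq, String.reduceToList] at hf09
          cases hf99 : t.findIdx? (fun l => PySem.Str.startswith l "|9999|") with
          | none =>
            simp only [PySem.Str.startswith_eq, String.reduceToList] at hf99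
            simp [pvVarredura, hhd, hs0, hs09, hs99, h09, h99,
                  List.findIdx?_cons, List.countP_cons, hf09, hf99]
            try omega
            try (constructor <;> (try split_ifs) <;> push_cast <;> ring)
            try (split_ifs <;> push_cast <;> ring)
            try (constructor <;> trivial)
          | some j =>
            simp only [PySem.Str.startswith_eq, String.reduceToList] at hf99
            simp [pvVarredura, hhd, hs0, hs09, hs99, h09, h99,
                  List.findIdx?_cons, List.countP_cons, hf09, hf99]
            try omega
            try (constructor <;> (try split_ifs) <;> push_cast <;> ring)
            try (split_ifs <;> push_cast <;> ring)
            try (constructor <;> trivial)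

-- replacing one non-matching element by a non-matching one keeps the first match
theorem pvFindIdx_set (p : String → Bool) : ∀ (ls : List String) (i : Nat) (x : String),
    p x = false → (∀ h : i < ls.length, p ls[i] = false) →
    List.findIdx? p (ls.set i x) = List.findIdx? p ls := by
  intro ls
  induction ls with
  | nil => intro i x _ _; simp
  | cons a as ih =>
    intro i x hx hi
    cases i with
    | zero =>
      have ha : p a = false := hi (by simp)
      simp [List.set, List.findIdx?_cons, hx, ha]
    | succ n =>
      simp only [List.set, List.findIdx?_cons]
      rw [ih n x hx (fun h => by simpa using hi (by simpa using Nat.succ_lt_succ h))]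

-- a startswith "|xyzw|" line decomposes as '|'::x::y::z::w::'|'::rest
theorem pvStartsDecomp (l p : String) (x y z w : Char)
    (hp : p.toList = ['|', x, y, z, w, '|'])
    (h : PySem.Str.startswith l p = true) :
    ∃ r, l.toList = '|' :: x :: y :: z :: w :: '|' :: r := by
  have hpre : PySem.Chars.startswith l.toList p.toList = true := h
  rw [PySem.Chars.startswith] at hpre
  obtain ⟨r, hr⟩ := List.isPrefixOf_iff_prefix.mp hpre
  exact ⟨r, by rw [← hr, hp]; rfl⟩

-- ===== VERDICT (by name: the statement is the Claim_ definition above) =====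
theorem totalizador_0990_9999_spec : Claim_equal_totalizador_0990_9999 := by
  intro linhas _
  show totalizador_0990_9999 linhas = totalizador_0990_9999_alt linhas
  simp only [totalizador_0990_9999, totalizador_0990_9999_alt]
  -- A's count is countP
  rw [PySem.List.foldl_count_if]
  simp only [zero_add]
  -- B's reverse loop is a foldr over the ascending range
  have hrev : PySem.List.pyRange ((linhas.length : Int) - 1) (-1) (-1) =
      (PySem.List.pyRange 0 (linhas.length : Int) 1).reverse := by
    rw [PySem.List.pyRange_neg_one_eq_reverse]
    norm_num
  rw [hrev, List.foldl_reverse]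
  have hscan := pvScanRev linhas linhas 0 (le_refl 0) (fun j hj => by
    rw [zero_add, PySem.List.pyGetD_natCast]
    exact List.getD_eq_getElem _ _ hj)
  simp only [zero_add] at hscan
  rw [hscan, pvEditFirstA_eq, pvEditFirstA_eq]
  set cnt : Int := ((linhas.countP (fun l => PySem.Str.startswith l "|0")) : Int) with hcnt
  cases hf1 : List.findIdx? (fun l => PySem.Str.startswith l "|0990|") linhas with
  | none =>
    simp only
    rw [if_neg (show ¬((0:Int) ≤ -1) by norm_num)]
    cases hf9 : List.findIdx? (fun l => PySem.Str.startswith l "|9999|") linhas with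
    | none => simp only; rw [if_neg (show ¬((0:Int) ≤ -1) by norm_num)]
    | some j =>
      obtain ⟨hjlt, hq9, -⟩ := List.findIdx?_eq_some_iff_getElem.mp hf9
      have hq9' : PySem.Str.startswith linhas[j] "|9999|" = true := hq9
      obtain ⟨r, hr⟩ := pvStartsDecomp linhas[j] "|9999|" '9' '9' '9' '9' rfl hq9'
      have hgd : linhas.getD j "" = linhas[j] := List.getD_eq_getElem _ _ hjlt
      simp only
      rw [if_pos (show (0:Int) ≤ (j:Int) by positivity), PySem.List.pySetD_natCast,
          PySem.List.pyGetD_natCast, hgd]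
      rw [pvEdit_eq _ _ '9' '9' '9' '9' r (by decide) (by decide) (by decide) (by decide) hr]
  | some i0 =>
    obtain ⟨hlt, hq1, -⟩ := List.findIdx?_eq_some_iff_getElem.mp hf1
    have hq1' : PySem.Str.startswith linhas[i0] "|0990|" = true := hq1
    obtain ⟨r0, hr0⟩ := pvStartsDecomp linhas[i0] "|0990|" '0' '9' '9' '0' rfl hq1'
    have hgd0 : linhas.getD i0 "" = linhas[i0] := List.getD_eq_getElem _ _ hlt
    simp only
    rw [if_pos (show (0:Int) ≤ (i0:Int) by positivity), PySem.List.pySetD_natCast,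
        PySem.List.pyGetD_natCast, hgd0]
    rw [pvEdit_eq _ _ '0' '9' '9' '0' r0 (by decide) (by decide) (by decide) (by decide) hr0]
    set nova := pvCirurgia linhas[i0] (PySem.Int.toStr cnt) with hnova
    set linhas1 := linhas.set i0 nova with hl1
    have hlen1 : linhas1.length = linhas.length := by rw [hl1]; simp
    have hnot99 : PySem.Str.startswith nova "|9999|" = false :=
      pvCirurgia_not99 _ _ r0 hr0
    have hset : List.findIdx? (fun l => PySem.Str.startswith l "|9999|") linhas1 =
        List.findIdx? (fun l => PySem.Str.startswith l "|9999|") linhas := by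
      exact pvFindIdx_set _ linhas i0 nova hnot99 (fun _ => pvPrefix_excl _ hq1')
    rw [hset, hlen1]
    cases hf9 : List.findIdx? (fun l => PySem.Str.startswith l "|9999|") linhas with
    | none => simp only; rw [if_neg (show ¬((0:Int) ≤ -1) by norm_num)]
    | some j =>
      obtain ⟨hjlt, hq9, -⟩ := List.findIdx?_eq_some_iff_getElem.mp hf9
      have hq9' : PySem.Str.startswith linhas[j] "|9999|" = true := hq9
      have hne : i0 ≠ j := by
        intro he
        subst he
        rw [pvPrefix_excl _ hq1'] at hq9'
        exact absurd hq9' (by simp)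
      have hgd1 : linhas1.getD j "" = linhas[j] := by
        rw [hl1]
        rw [List.getD_eq_getElem _ _ (show j < (linhas.set i0 nova).length by
          rw [List.length_set]; omega)]
        exact List.getElem_set_ne (by omega) _
      obtain ⟨r, hr⟩ := pvStartsDecomp linhas[j] "|9999|" '9' '9' '9' '9' rfl hq9'
      simp only
      rw [if_pos (show (0:Int) ≤ (j:Int) by positivity), PySem.List.pySetD_natCast,
          PySem.List.pyGetD_natCast, hgd1]
      rw [pvEdit_eq _ _ '9' '9' '9' '9' r (by decide) (by decide) (by decide) (by decide) hr]
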